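-- pv_equiv track=rewrite | github.com/KeatonMacLeod/DataminingProject | predictive_model.py | find_frequent_patterns_occuring_in_all_previous_years
-- ===== SOURCE A (Python) =====
-- def find_frequent_patterns_occuring_in_all_previous_years(previous_years_frequent_patterns, frequent_pattern_min_length):
--     all_frequent_previous_years_patterns = {}
--
--     for pattern, count in previous_years_frequent_patterns["2014"].items():
--         if pattern in previous_years_frequent_patterns["2015"] and pattern in previous_years_frequent_patterns["2016"] and len(pattern) == frequent_pattern_min_length:
--             all_frequent_previous_years_patterns[pattern] = {}
--             all_frequent_previous_years_patterns[pattern]["2014"] = previous_years_frequent_patterns["2014"][pattern]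
--             all_frequent_previous_years_patterns[pattern]["2015"] = previous_years_frequent_patterns["2015"][pattern]
--             all_frequent_previous_years_patterns[pattern]["2016"] = previous_years_frequent_patterns["2016"][pattern]
--
--     return all_frequent_previous_years_patterns
-- ===== SOURCE B (Python) =====
-- def find_frequent_patterns_occuring_in_all_previous_years(previous_years_frequent_patterns, frequent_pattern_min_length):
--     merged = {}
--     for year in ("2014", "2015", "2016"):
--         for pattern, count in previous_years_frequent_patterns[year].items():
--             merged.setdefault(pattern, {})[year] = count
--     return {pattern: year_counts
--             for pattern, year_counts in merged.items()
--             if len(year_counts) == 3 and len(pattern) == frequent_pattern_min_length}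
-- ===== Notes on version B (the rewrite author's own statement) =====
-- stated objective: alternative
-- what changed: B replaces A's single filtered scan of 2014's keys (with membership tests into 2015/2016) by a group-by: it merges all items of all three years into one pattern -> {year: count} index via setdefault, then keeps the entries whose year-dict is complete (len == 3) and whose pattern has the required length.
-- outside the precondition, e.g. on find_frequent_patterns_occuring_in_all_previous_years({'2014': {}}, 1): A returns {}, B raises KeyError
import Mathlib
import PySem

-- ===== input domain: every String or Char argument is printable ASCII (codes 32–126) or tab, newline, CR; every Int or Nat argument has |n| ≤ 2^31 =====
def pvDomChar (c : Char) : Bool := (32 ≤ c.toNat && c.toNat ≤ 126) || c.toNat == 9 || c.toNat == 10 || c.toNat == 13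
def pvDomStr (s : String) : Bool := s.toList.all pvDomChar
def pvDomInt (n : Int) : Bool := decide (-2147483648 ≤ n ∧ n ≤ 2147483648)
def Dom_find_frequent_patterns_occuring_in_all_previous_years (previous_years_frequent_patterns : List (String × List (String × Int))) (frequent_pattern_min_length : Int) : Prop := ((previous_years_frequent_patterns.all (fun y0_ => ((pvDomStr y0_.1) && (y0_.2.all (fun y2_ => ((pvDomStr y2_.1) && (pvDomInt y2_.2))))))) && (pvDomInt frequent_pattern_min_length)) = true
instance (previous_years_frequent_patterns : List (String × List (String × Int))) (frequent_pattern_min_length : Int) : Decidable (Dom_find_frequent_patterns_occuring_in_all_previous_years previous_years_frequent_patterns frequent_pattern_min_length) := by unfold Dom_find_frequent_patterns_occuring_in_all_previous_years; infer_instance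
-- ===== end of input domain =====

-- B replaces A's filtered scan of 2014's keys (with membership tests into 2015/2016) by a group-by:
-- merge all items of all three years into one pattern -> {year: count} index, then keep entries whose
-- year-dict is complete (len == 3) and whose pattern has the required length; same values, not faster.

-- ===== PORT A =====
-- A iterates previous_years_frequent_patterns["2014"].items(); 'all[p] = {}' followed by the three
-- year assignments is written as the nested inserts those statements perform; the inner indexing
-- d15[p] / d16[p] happens only under the membership guard, so getD _ 0 is exact there.
def find_frequent_patterns_occuring_in_all_previous_years (previous_years_frequent_patterns : List (String × List (String × Int))) (frequent_pattern_min_length : Int) : List (String × List (String × Int)) :=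
  let outer : PySem.Dict String (PySem.Dict String Int) :=
    PySem.Dict.ofList (previous_years_frequent_patterns.map (fun y => (y.1, PySem.Dict.ofList y.2)))
  match outer.get? "2014", outer.get? "2015", outer.get? "2016" with
  | some d14, some d15, some d16 =>
      let res : PySem.Dict String (PySem.Dict String Int) :=
        d14.items.foldl
          (fun acc pc =>
            if d15.contains pc.1 && d16.contains pc.1 && (PySem.Str.len pc.1 == frequent_pattern_min_length) then
              acc.insert pc.1
                (((PySem.Dict.empty.insert "2014" (d14.getD pc.1 0)).insert "2015"
                    (d15.getD pc.1 0)).insert "2016" (d16.getD pc.1 0))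
            else acc)
          PySem.Dict.empty
      res.items.map (fun q => (q.1, q.2.items))
  | _, _, _ => []   -- KeyError: a year key is missing; excluded by Pre_

-- ===== PORT B =====
-- one iteration of B's inner loop: for pattern, count in d[year].items(): merged.setdefault(pattern, {})[year] = count
-- (setdefault appends the key if absent, then the item assignment overwrites in place = Dict.insert)
def pvMergePass (year : String) (l : List (String × Int)) (acc : PySem.Dict String (PySem.Dict String Int)) : PySem.Dict String (PySem.Dict String Int) :=
  l.foldl (fun a pc => a.insert pc.1 ((a.getD pc.1 PySem.Dict.empty).insert year pc.2)) acc

def find_frequent_patterns_occuring_in_all_previous_years_alt (previous_years_frequent_patterns : List (String × List (String × Int))) (frequent_pattern_min_length : Int) : List (String × List (String × Int)) :=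
  let outer : PySem.Dict String (PySem.Dict String Int) :=
    PySem.Dict.ofList (previous_years_frequent_patterns.map (fun y => (y.1, PySem.Dict.ofList y.2)))
  match outer.get? "2014" with
  | none => []   -- KeyError: a year key is missing; excluded by Pre_
  | some d14 =>
  match outer.get? "2015" with
  | none => []
  | some d15 =>
  match outer.get? "2016" with
  | none => []
  | some d16 =>
      -- the 'for year in ("2014","2015","2016")' loop, unrolled
      let merged := pvMergePass "2016" d16.items (pvMergePass "2015" d15.items (pvMergePass "2014" d14.items PySem.Dict.empty))
      -- the dict comprehension, emitted as its item list
      (merged.items.filter (fun q => (PySem.Dict.size q.2 == 3) && (PySem.Str.len q.1 == frequent_pattern_min_length))).map (fun q => (q.1, q.2.items))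

-- ===== PRECONDITION & SPEC =====
-- Pre_ excludes inputs missing one of the year keys "2014"/"2015"/"2016": B reads all three dicts and raises
-- KeyError there, while A, whose guard short-circuits, sometimes returns {} instead of raising on the same inputs.
def Pre_find_frequent_patterns_occuring_in_all_previous_years (previous_years_frequent_patterns : List (String × List (String × Int))) (frequent_pattern_min_length : Int) : Prop :=
  "2014" ∈ previous_years_frequent_patterns.map (·.1) ∧
  "2015" ∈ previous_years_frequent_patterns.map (·.1) ∧
  "2016" ∈ previous_years_frequent_patterns.map (·.1)
instance (previous_years_frequent_patterns : List (String × List (String × Int))) (frequent_pattern_min_length : Int) : Decidable (Pre_find_frequent_patterns_occuring_in_all_previous_years previous_years_frequent_patterns frequent_pattern_min_length) := by unfold Pre_find_frequent_patterns_occuring_in_all_previous_years; infer_instance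

def pvWitness_find_frequent_patterns_occuring_in_all_previous_years : (List (String × List (String × Int))) × Int :=
  ([("2014", [("ab", 1), ("c", 2)]), ("2015", [("ab", 3)]), ("2016", [("ab", 9)])], 2)

def Spec_find_frequent_patterns_occuring_in_all_previous_years (previous_years_frequent_patterns : List (String × List (String × Int))) (frequent_pattern_min_length : Int) (out : List (String × List (String × Int))) : Prop := out = find_frequent_patterns_occuring_in_all_previous_years_alt previous_years_frequent_patterns frequent_pattern_min_length
instance (previous_years_frequent_patterns : List (String × List (String × Int))) (frequent_pattern_min_length : Int) (out : List (String × List (String × Int))) : Decidable (Spec_find_frequent_patterns_occuring_in_all_previous_years previous_years_frequent_patterns frequent_pattern_min_length out) := by unfold Spec_find_frequent_patterns_occuring_in_all_previous_years; infer_instance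

-- ===== CLAIM (what is proved, stated in full; the proofs are below) =====
def Claim_equal_find_frequent_patterns_occuring_in_all_previous_years : Prop := ∀ (previous_years_frequent_patterns : List (String × List (String × Int))) (frequent_pattern_min_length : Int), Dom_find_frequent_patterns_occuring_in_all_previous_years previous_years_frequent_patterns frequent_pattern_min_length → Pre_find_frequent_patterns_occuring_in_all_previous_years previous_years_frequent_patterns frequent_pattern_min_length → Spec_find_frequent_patterns_occuring_in_all_previous_years previous_years_frequent_patterns frequent_pattern_min_length (find_frequent_patterns_occuring_in_all_previous_years previous_years_frequent_patterns frequent_pattern_min_length)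

-- ===== LEMMAS AND PROOFS =====

-- keys of Dict.ofList are the distinct first components
theorem pv_keys_ofList {ν : Type} (ps : List (String × ν)) :
    (PySem.Dict.ofList ps).keys = PySem.Set.ofList (ps.map (·.1)) := by
  simp [PySem.Dict.ofList, PySem.Dict.update, PySem.Dict.keys_foldl_insert_key,
    PySem.Set.update_nil_left]

theorem pv_get?_ofList_isSome {ν : Type} (ps : List (String × ν)) (k : String)
    (h : k ∈ ps.map (·.1)) : ((PySem.Dict.ofList ps).get? k).isSome := by
  by_contra hc
  rw [Option.not_isSome_iff_eq_none, PySem.Dict.get?_eq_none_iff_not_mem_keys, pv_keys_ofList] at hc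
  exact hc ((PySem.Set.mem_ofList _ _).mpr h)

-- every value of the wrapped outer dict is itself a Dict.ofList (hence has Nodup keys)
theorem pv_values_are_ofList (l : List (String × List (String × Int)))
    (d : PySem.Dict String (PySem.Dict String Int))
    (hd : ∀ v ∈ d.values, ∃ ys, v = PySem.Dict.ofList ys) :
    ∀ v ∈ (l.foldl (fun acc y => acc.insert y.1 (PySem.Dict.ofList y.2)) d).values,
      ∃ ys, v = PySem.Dict.ofList ys := by
  induction l generalizing d with
  | nil => simpa using hd
  | cons y t ih =>
      intro v hv
      refine ih (d.insert y.1 (PySem.Dict.ofList y.2)) ?_ v (by simpa using hv)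
      intro w hw
      rcases PySem.Dict.mem_values_insert _ _ _ _ hw with h | h
      · exact ⟨y.2, h⟩
      · exact hd w h

theorem pv_get?_outer_nodup (l : List (String × List (String × Int))) (k : String)
    (d : PySem.Dict String Int)
    (h : (PySem.Dict.ofList (l.map (fun y => (y.1, PySem.Dict.ofList y.2)))).get? k = some d) :
    d.keys.Nodup := by
  have hv : d ∈ (PySem.Dict.ofList (l.map (fun y => (y.1, PySem.Dict.ofList y.2)))).values := by
    have h1 := PySem.Dict.mem_items_of_get?_eq_some _ h
    simp only [PySem.Dict.values]
    exact List.mem_map.mpr ⟨(k, d), h1, rfl⟩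
  have : ∃ ys, d = PySem.Dict.ofList ys := by
    have heq : PySem.Dict.ofList (l.map (fun y => (y.1, PySem.Dict.ofList y.2)))
        = l.foldl (fun acc y => acc.insert y.1 (PySem.Dict.ofList y.2)) PySem.Dict.empty := by
      simp [PySem.Dict.ofList, PySem.Dict.update, List.foldl_map]
    refine pv_values_are_ofList l PySem.Dict.empty ?_ d (heq ▸ hv)
    simp [PySem.Dict.values, PySem.Dict.empty]
  rcases this with ⟨ys, rfl⟩
  exact PySem.Dict.nodup_keys_ofList ys

-- A's conditional-insert loop over fresh distinct keys builds exactly the filtered item list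
theorem pv_foldA (P : String × Int → Bool) (g : String → PySem.Dict String Int)
    (l : List (String × Int)) (acc : PySem.Dict String (PySem.Dict String Int))
    (hnd : (l.map (·.1)).Nodup) (hfresh : ∀ pc ∈ l, acc.contains pc.1 = false) :
    (l.foldl (fun acc pc => if P pc then acc.insert pc.1 (g pc.1) else acc) acc).items
      = acc.items ++ (l.filter P).map (fun pc => (pc.1, g pc.1)) := by
  induction l generalizing acc with
  | nil => simp
  | cons pc t ih =>
      simp only [List.map_cons, List.nodup_cons] at hnd
      by_cases hP : P pc
      · have hfr : acc.contains pc.1 = false := hfresh pc (by simp)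
        have hfresh' : ∀ q ∈ t, (acc.insert pc.1 (g pc.1)).contains q.1 = false := by
          intro q hq
          rw [PySem.Dict.contains_insert]
          have h1 : q.1 ≠ pc.1 := fun he => hnd.1 (he ▸ List.mem_map_of_mem hq)
          simp [h1, hfresh q (by simp [hq])]
        simp only [List.foldl_cons, hP, if_pos]
        rw [ih (acc.insert pc.1 (g pc.1)) hnd.2 hfresh',
          PySem.Dict.items_insert_of_not_contains _ _ hfr]
        simp [hP]
      · simp only [List.foldl_cons, if_neg hP]
        rw [ih acc hnd.2 (fun q hq => hfresh q (by simp [hq]))]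
        simp [hP]

-- ---- B-side lemmas ----

theorem pv_lookup_eq_none {β : Type} (l : List (String × β)) (k : String)
    (h : k ∉ l.map (·.1)) : l.lookup k = none := by
  induction l with
  | nil => rfl
  | cons p t ih =>
      simp only [List.map_cons, List.mem_cons, not_or] at h
      have hbk : (k == p.1) = false := by simpa using h.1
      simp [List.lookup, hbk, ih h.2]

theorem pv_lookup_of_mem {β : Type} (l : List (String × β)) (k : String) (v : β)
    (hnd : (l.map (·.1)).Nodup) (hm : (k, v) ∈ l) : l.lookup k = some v := by
  induction l with
  | nil => simp at hm
  | cons p t ih =>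
      simp only [List.map_cons, List.nodup_cons] at hnd
      rcases List.mem_cons.mp hm with h | h
      · subst h; simp [List.lookup]
      · have hbk : (k == p.1) = false := by
          have hmem : k ∈ t.map (·.1) := List.mem_map.mpr ⟨(k, v), h, rfl⟩
          simp only [beq_eq_false_iff_ne]
          exact fun he => hnd.1 (he ▸ hmem)
        simp [List.lookup, hbk, ih hnd.2 h]

-- the update applied to an existing entry by one merge pass
def pvUpd (year : String) (l : List (String × Int)) (q : String × PySem.Dict String Int) : String × PySem.Dict String Int :=
  match l.lookup q.1 with
  | some c => (q.1, q.2.insert year c)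
  | none => q

-- one merge pass: existing entries get the year inserted (if their pattern occurs in l),
-- patterns new to the accumulator are appended with a fresh one-entry dict
theorem pv_pass_items (year : String) (l : List (String × Int))
    (acc : PySem.Dict String (PySem.Dict String Int))
    (hnd : (l.map (·.1)).Nodup) (hacc : acc.keys.Nodup) :
    (pvMergePass year l acc).items =
      acc.items.map (pvUpd year l)
        ++ (l.filter (fun pc => !acc.contains pc.1)).map
             (fun pc => (pc.1, PySem.Dict.empty.insert year pc.2)) := by
  induction l generalizing acc with
  | nil =>
      have hid : pvUpd year [] = id := funext fun q => rfl
      simp [pvMergePass, hid]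
  | cons pc t ih =>
      simp only [List.map_cons, List.nodup_cons] at hnd
      have hstep : pvMergePass year (pc :: t) acc
          = pvMergePass year t (acc.insert pc.1 ((acc.getD pc.1 PySem.Dict.empty).insert year pc.2)) := rfl
      set nv := (acc.getD pc.1 PySem.Dict.empty).insert year pc.2 with hnv
      have hacc' : (acc.insert pc.1 nv).keys.Nodup := PySem.Dict.nodup_keys_insert _ _ _ hacc
      have hconts : ∀ q ∈ t, (acc.insert pc.1 nv).contains q.1 = acc.contains q.1 := by
        intro q hq
        rw [PySem.Dict.contains_insert]
        have h1 : (q.1 == pc.1) = false := by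
          simp only [beq_eq_false_iff_ne]
          exact fun he => hnd.1 (he ▸ List.mem_map_of_mem hq)
        simp [h1]
      have hfilter : t.filter (fun q => !(acc.insert pc.1 nv).contains q.1)
          = t.filter (fun q => !acc.contains q.1) :=
        List.filter_congr (fun q hq => by rw [hconts q hq])
      by_cases hb : acc.contains pc.1
      · -- pattern already present: in-place update
        rw [hstep, ih _ hnd.2 hacc', hfilter,
          PySem.Dict.items_insert_of_contains _ _ hb, List.map_map]
        have hhead : (pc :: t).filter (fun q => !acc.contains q.1)
            = t.filter (fun q => !acc.contains q.1) := by
          simp [hb]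
        rw [hhead]
        congr 1
        apply List.map_congr_left
        intro q hq
        by_cases hk : q.1 = pc.1
        · have hval : acc.getD pc.1 PySem.Dict.empty = q.2 := by
            have h0 : (q.1, q.2) ∈ acc.items := by simpa using hq
            rw [hk] at h0
            exact PySem.Dict.getD_of_mem_items _ h0 hacc _
          have hlk : t.lookup pc.1 = none :=
            pv_lookup_eq_none t pc.1 (fun hm => hnd.1 hm)
          simp [Function.comp, pvUpd, hk, List.lookup, hlk, hnv, hval]
        · have hbeq : (q.1 == pc.1) = false := by simpa using hk
          simp [Function.comp, pvUpd, List.lookup, hbeq]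
      · -- fresh pattern: appended with a one-entry dict
        have hval : acc.getD pc.1 PySem.Dict.empty = PySem.Dict.empty :=
          PySem.Dict.getD_of_not_contains _ _ (by simpa using hb)
        rw [hstep, ih _ hnd.2 hacc', hfilter,
          PySem.Dict.items_insert_of_not_contains _ _ (by simpa using hb), List.map_append]
        have hnotkey : ∀ q ∈ acc.items, q.1 ≠ pc.1 := by
          intro q hq he
          exact hb (by
            rw [PySem.Dict.contains_eq_decide_mem_keys]
            exact decide_eq_true (he ▸ PySem.Dict.mem_keys_of_mem_items _ hq))
        have hmapeq : acc.items.map (pvUpd year t) = acc.items.map (pvUpd year (pc :: t)) := by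
          apply List.map_congr_left
          intro q hq
          have hbeq : (q.1 == pc.1) = false := by simpa using hnotkey q hq
          simp [pvUpd, List.lookup, hbeq]
        have hselflk : t.lookup pc.1 = none :=
          pv_lookup_eq_none t pc.1 (fun hm => hnd.1 hm)
        have hheadfilter : (pc :: t).filter (fun q => !acc.contains q.1)
            = pc :: t.filter (fun q => !acc.contains q.1) := by
          simp [hb]
        rw [hheadfilter]
        simp only [List.map_cons]
        rw [hmapeq, hnv, hval]
        simp [pvUpd, hselflk]

theorem pv_items_empty {kappa nu : Type} [BEq kappa] : (PySem.Dict.empty : PySem.Dict kappa nu).items = [] := rfl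

-- keys stay unique through a merge pass
theorem pv_pass_nodup (year : String) (l : List (String × Int))
    (acc : PySem.Dict String (PySem.Dict String Int)) (hacc : acc.keys.Nodup) :
    (pvMergePass year l acc).keys.Nodup :=
  PySem.Dict.nodup_keys_foldl_insert_key l (·.1)
    (fun a pc => (a.getD pc.1 PySem.Dict.empty).insert year pc.2) acc hacc

-- the whole equivalence on the three unwrapped year dicts
theorem pv_main (d14 d15 d16 : PySem.Dict String Int)
    (h14 : d14.keys.Nodup) (h15 : d15.keys.Nodup) (h16 : d16.keys.Nodup) (L : Int) :
    ((d14.items.foldl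
        (fun acc pc =>
          if d15.contains pc.1 && d16.contains pc.1 && (PySem.Str.len pc.1 == L) then
            acc.insert pc.1
              (((PySem.Dict.empty.insert "2014" (d14.getD pc.1 0)).insert "2015"
                  (d15.getD pc.1 0)).insert "2016" (d16.getD pc.1 0))
          else acc)
        PySem.Dict.empty).items.map (fun q => (q.1, q.2.items)))
    = (((pvMergePass "2016" d16.items
          (pvMergePass "2015" d15.items
            (pvMergePass "2014" d14.items PySem.Dict.empty))).items.filter
          (fun q => (PySem.Dict.size q.2 == 3) && (PySem.Str.len q.1 == L))).map
        (fun q => (q.1, q.2.items))) := by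
  have hnd14 : (d14.items.map (·.1)).Nodup := h14
  have hnd15 : (d15.items.map (·.1)).Nodup := h15
  have hnd16 : (d16.items.map (·.1)).Nodup := h16
  -- A side
  rw [pv_foldA
      (fun pc => d15.contains pc.1 && d16.contains pc.1 && (PySem.Str.len pc.1 == L))
      (fun pat => ((PySem.Dict.empty.insert "2014" (d14.getD pat 0)).insert "2015"
          (d15.getD pat 0)).insert "2016" (d16.getD pat 0))
      d14.items PySem.Dict.empty hnd14 (fun pc _ => PySem.Dict.contains_empty _)]
  have hempty : (PySem.Dict.empty : PySem.Dict String (PySem.Dict String Int)).items = [] := rfl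
  rw [hempty, List.nil_append]
  -- B side: unfold the three passes
  have hM1nd : (pvMergePass "2014" d14.items PySem.Dict.empty).keys.Nodup :=
    pv_pass_nodup _ _ _ (by simp [PySem.Dict.keys_empty])
  have hM2nd : (pvMergePass "2015" d15.items (pvMergePass "2014" d14.items PySem.Dict.empty)).keys.Nodup :=
    pv_pass_nodup _ _ _ hM1nd
  have hM1 : (pvMergePass "2014" d14.items PySem.Dict.empty).items
      = d14.items.map (fun pc => (pc.1, PySem.Dict.empty.insert "2014" pc.2)) := by
    rw [pv_pass_items _ _ _ hnd14 (by simp [PySem.Dict.keys_empty])]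
    simp [PySem.Dict.contains_empty, pv_items_empty]
  have hM2 := pv_pass_items "2015" d15.items _ hnd15 hM1nd
  have hM3 := pv_pass_items "2016" d16.items _ hnd16 hM2nd
  rw [hM3, hM2, hM1]
  simp only [List.map_append, List.map_map, List.filter_append]
  -- the patterns appended in passes 2 and 3 never reach three years: they are filtered out
  have hdrop3 : ((d16.items.filter
        (fun pc => !(pvMergePass "2015" d15.items (pvMergePass "2014" d14.items PySem.Dict.empty)).contains pc.1)).map
          (fun pc => (pc.1, PySem.Dict.empty.insert "2016" pc.2))).filter
        (fun q => (PySem.Dict.size q.2 == 3) && (PySem.Str.len q.1 == L)) = [] := by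
    rw [List.filter_eq_nil_iff]
    intro q hq
    rcases List.mem_map.mp hq with ⟨pc, _, rfl⟩
    simp [PySem.Dict.size, PySem.Dict.items_insert_of_not_contains _ _ (PySem.Dict.contains_empty _),
      pv_items_empty]
  have hdrop2 : ((d15.items.filter
        (fun pc => !(pvMergePass "2014" d14.items PySem.Dict.empty).contains pc.1)).map
          (pvUpd "2016" d16.items ∘ fun pc => (pc.1, PySem.Dict.empty.insert "2015" pc.2))).filter
        (fun q => (PySem.Dict.size q.2 == 3) && (PySem.Str.len q.1 == L)) = [] := by
    rw [List.filter_eq_nil_iff]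
    intro q hq
    rcases List.mem_map.mp hq with ⟨pc, _, rfl⟩
    have h1 : (PySem.Dict.empty.insert "2015" pc.2).items = [("2015", pc.2)] := by
      simp [PySem.Dict.items_insert_of_not_contains _ _ (PySem.Dict.contains_empty _),
        pv_items_empty]
    cases hlk : d16.items.lookup pc.1 with
    | none => simp [Function.comp, pvUpd, hlk, PySem.Dict.size, h1]
    | some c =>
        have hc : (PySem.Dict.empty.insert "2015" pc.2).contains "2016" = false := by
          rw [PySem.Dict.contains_insert]
          simp [PySem.Dict.contains_empty]
        have h2 : ((PySem.Dict.empty.insert "2015" pc.2).insert "2016" c).items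
            = [("2015", pc.2), ("2016", c)] := by
          rw [PySem.Dict.items_insert_of_not_contains _ _ hc, h1]
          rfl
        simp [Function.comp, pvUpd, hlk, PySem.Dict.size, h2]
  rw [hdrop3, hdrop2]
  simp only [List.append_nil, List.map_nil]
  -- remaining: the 2014-rooted segment
  rw [List.filter_map, List.map_map]
  -- lookup ↔ contains/getD bridges on nodup dicts
  have hlk15 : ∀ k, d15.contains k = true → d15.items.lookup k = some (d15.getD k 0) := by
    intro k hk
    rw [PySem.Dict.contains_eq_decide_mem_keys] at hk
    have hkm : k ∈ d15.keys := of_decide_eq_true hk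
    rcases List.mem_map.mp hkm with ⟨q, hq, rfl⟩
    rw [pv_lookup_of_mem _ _ q.2 hnd15 (by simpa using hq), PySem.Dict.getD_of_mem_items _ (by simpa using hq) h15 0]
  have hlk16 : ∀ k, d16.contains k = true → d16.items.lookup k = some (d16.getD k 0) := by
    intro k hk
    rw [PySem.Dict.contains_eq_decide_mem_keys] at hk
    have hkm : k ∈ d16.keys := of_decide_eq_true hk
    rcases List.mem_map.mp hkm with ⟨q, hq, rfl⟩
    rw [pv_lookup_of_mem _ _ q.2 hnd16 (by simpa using hq), PySem.Dict.getD_of_mem_items _ (by simpa using hq) h16 0]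
  have hlk15n : ∀ k, d15.contains k = false → d15.items.lookup k = none := by
    intro k hk
    refine pv_lookup_eq_none _ _ (fun hm => ?_)
    rw [PySem.Dict.contains_eq_decide_mem_keys] at hk
    exact absurd (decide_eq_true (p := k ∈ d15.keys) hm) (by simp [hk])
  have hlk16n : ∀ k, d16.contains k = false → d16.items.lookup k = none := by
    intro k hk
    refine pv_lookup_eq_none _ _ (fun hm => ?_)
    rw [PySem.Dict.contains_eq_decide_mem_keys] at hk
    exact absurd (decide_eq_true (p := k ∈ d16.keys) hm) (by simp [hk])
  -- the value built on the B side for a 2014 item pc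
  have hitems1 : ∀ c : Int, (PySem.Dict.empty.insert "2014" c).items = [("2014", c)] := by
    intro c
    simp [PySem.Dict.items_insert_of_not_contains _ _ (PySem.Dict.contains_empty _),
      pv_items_empty]
  have hitems2 : ∀ c c15 : Int, ((PySem.Dict.empty.insert "2014" c).insert "2015" c15).items
      = [("2014", c), ("2015", c15)] := by
    intro c c15
    have hc : (PySem.Dict.empty.insert "2014" c).contains "2015" = false := by
      rw [PySem.Dict.contains_insert]
      simp [PySem.Dict.contains_empty]
    rw [PySem.Dict.items_insert_of_not_contains _ _ hc, hitems1]
    rfl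
  have hitems2b : ∀ c c16 : Int, ((PySem.Dict.empty.insert "2014" c).insert "2016" c16).items
      = [("2014", c), ("2016", c16)] := by
    intro c c16
    have hc : (PySem.Dict.empty.insert "2014" c).contains "2016" = false := by
      rw [PySem.Dict.contains_insert]
      simp [PySem.Dict.contains_empty]
    rw [PySem.Dict.items_insert_of_not_contains _ _ hc, hitems1]
    rfl
  have hitems3 : ∀ c c15 c16 : Int,
      (((PySem.Dict.empty.insert "2014" c).insert "2015" c15).insert "2016" c16).items
      = [("2014", c), ("2015", c15), ("2016", c16)] := by
    intro c c15 c16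
    have hc : ((PySem.Dict.empty.insert "2014" c).insert "2015" c15).contains "2016" = false := by
      rw [PySem.Dict.contains_insert, PySem.Dict.contains_insert]
      simp [PySem.Dict.contains_empty]
    rw [PySem.Dict.items_insert_of_not_contains _ _ hc, hitems2]
    rfl
  -- predicates agree on 2014 items
  have hpred : ∀ pc ∈ d14.items,
      (d15.contains pc.1 && d16.contains pc.1 && (PySem.Str.len pc.1 == L))
        = ((fun q => (PySem.Dict.size q.2 == 3) && (PySem.Str.len q.1 == L)) ∘
            (pvUpd "2016" d16.items ∘ (pvUpd "2015" d15.items ∘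
              fun pc => (pc.1, PySem.Dict.empty.insert "2014" pc.2)))) pc := by
    intro pc _
    cases hc15 : d15.contains pc.1 with
    | false =>
        cases hc16 : d16.contains pc.1 with
        | false =>
            simp [Function.comp, pvUpd, hlk15n _ hc15, hlk16n _ hc16, PySem.Dict.size, hitems1]
        | true =>
            simp [Function.comp, pvUpd, hlk15n _ hc15, hlk16 _ hc16, PySem.Dict.size, hitems2b]
    | true =>
        cases hc16 : d16.contains pc.1 with
        | false =>
            simp [Function.comp, pvUpd, hlk15 _ hc15, hlk16n _ hc16, PySem.Dict.size, hitems2]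
        | true =>
            simp [Function.comp, pvUpd, hlk15 _ hc15, hlk16 _ hc16, PySem.Dict.size, hitems3]
  rw [← List.filter_congr hpred]
  apply List.map_congr_left
  intro pc hpc
  have hpcmem : pc ∈ d14.items := List.mem_filter.mp hpc |>.1
  have hcond := List.mem_filter.mp hpc |>.2
  have hc15 : d15.contains pc.1 = true := by
    cases h : d15.contains pc.1 with
    | true => rfl
    | false => rw [h] at hcond; simp at hcond
  have hc16 : d16.contains pc.1 = true := by
    cases h : d16.contains pc.1 with
    | true => rfl
    | false => rw [h] at hcond; simp at hcond
  have hgd14 : d14.getD pc.1 0 = pc.2 := by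
    have h0 : (pc.1, pc.2) ∈ d14.items := by simpa using hpcmem
    exact PySem.Dict.getD_of_mem_items _ h0 h14 0
  simp [Function.comp, pvUpd, hlk15 _ hc15, hlk16 _ hc16, hgd14, hitems3]

-- ===== VERDICT (by name: the statement is the Claim_ definition above) =====
theorem find_frequent_patterns_occuring_in_all_previous_years_spec : Claim_equal_find_frequent_patterns_occuring_in_all_previous_years := by
  intro p L _hDom hPre
  unfold Spec_find_frequent_patterns_occuring_in_all_previous_years
  unfold find_frequent_patterns_occuring_in_all_previous_years
    find_frequent_patterns_occuring_in_all_previous_years_alt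
  dsimp only
  obtain ⟨h14, h15, h16⟩ := hPre
  have hk : ∀ k, k ∈ p.map (·.1) →
      (((PySem.Dict.ofList (p.map (fun y => (y.1, PySem.Dict.ofList y.2)))).get? k).isSome) := by
    intro k hkmem
    apply pv_get?_ofList_isSome
    simpa [Function.comp] using hkmem
  obtain ⟨d14, hd14⟩ := Option.isSome_iff_exists.mp (hk _ h14)
  obtain ⟨d15, hd15⟩ := Option.isSome_iff_exists.mp (hk _ h15)
  obtain ⟨d16, hd16⟩ := Option.isSome_iff_exists.mp (hk _ h16)
  rw [hd14, hd15, hd16]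
  dsimp only
  exact pv_main d14 d15 d16 (pv_get?_outer_nodup p _ _ hd14) (pv_get?_outer_nodup p _ _ hd15)
    (pv_get?_outer_nodup p _ _ hd16) L
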